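-- pv_equiv track=rewrite | github.com/kalradev/project-interview | interview/app/services/resume_platform_service.py | _extract_skills_from_text
-- ===== SOURCE A (Python) =====
-- def _extract_skills_from_text(text: str, skill_list: list[str]) -> list[str]:
--     """Return list of skills from skill_list that appear in text (lowercase)."""
--     if not text or not isinstance(text, str):
--         return []
--     text_lower = text.lower()
--     found = []
--     for skill in sorted(skill_list, key=len, reverse=True):
--         if skill in text_lower and skill not in found:
--             # Avoid subsumed (e.g. "node" vs "node.js")
--             if not any(skill in f for f in found):
--                 found.append(skill)
--     return found
-- ===== SOURCE B (Python) =====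
-- def _extract_skills_from_text(text: str, skill_list: list[str]) -> list[str]:
--     """Return list of skills from skill_list that appear in text (lowercase)."""
--     if not text or not isinstance(text, str):
--         return []
--     text_lower = text.lower()
--     # collect the distinct matching skills once (longest first, stable), then
--     # keep exactly the maximal ones: those not contained in another matched skill
--     matched = list(dict.fromkeys(
--         s for s in sorted(skill_list, key=len, reverse=True) if s in text_lower))
--     return [s for s in matched
--             if not any(s in t for t in matched if t != s)]
-- ===== Notes on version B (the rewrite author's own statement) =====
-- stated objective: alternative
-- what changed: A's stateful greedy loop that grows a `found` list and rescans it for each skill is replaced by a stateless two-phase form: collect the distinct matching skills once (longest first), then keep exactly the maximal ones, i.e. those not a substring of any other matched skill.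
import Mathlib
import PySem

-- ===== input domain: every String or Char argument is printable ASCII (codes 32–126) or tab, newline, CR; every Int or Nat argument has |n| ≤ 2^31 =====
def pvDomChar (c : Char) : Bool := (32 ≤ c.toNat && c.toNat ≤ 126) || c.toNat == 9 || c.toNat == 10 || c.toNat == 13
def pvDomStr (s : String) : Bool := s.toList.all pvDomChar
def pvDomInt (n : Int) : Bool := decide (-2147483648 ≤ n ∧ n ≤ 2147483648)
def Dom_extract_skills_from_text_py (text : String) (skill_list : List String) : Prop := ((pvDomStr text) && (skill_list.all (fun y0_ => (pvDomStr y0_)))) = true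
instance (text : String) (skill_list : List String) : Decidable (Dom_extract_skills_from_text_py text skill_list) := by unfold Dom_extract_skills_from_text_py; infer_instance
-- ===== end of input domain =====

-- B replaces A's stateful greedy loop (growing `found`, rescanned for every skill) by a
-- stateless two-phase form: collect the distinct matching skills once, then keep exactly
-- the maximal ones under the substring order; objective: alternative (same cost class).

-- ===== PORT A =====
-- literal transliteration of A; `not isinstance(text, str)` is always false for a String
def extract_skills_from_text_py (text : String) (skill_list : List String) : List String :=
  if text = "" then []
  else
    let text_lower := PySem.Str.lower text
    (PySem.List.sorted skill_list (fun s => PySem.Str.len s) true).foldl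
      (fun found skill =>
        if PySem.Str.isIn skill text_lower && !(found.contains skill) then
          if !(found.any (fun f => PySem.Str.isIn skill f)) then found ++ [skill]
          else found
        else found) []

-- ===== PORT B =====
def extract_skills_from_text_py_alt (text : String) (skill_list : List String) : List String :=
  if text = "" then []
  else
    let text_lower := PySem.Str.lower text
    let matched := PySem.List.dedup
      ((PySem.List.sorted skill_list (fun s => PySem.Str.len s) true).filter
        (fun s => PySem.Str.isIn s text_lower))
    matched.filter (fun s => !(matched.any (fun t => t != s && PySem.Str.isIn s t)))

-- ===== PRECONDITION & SPEC =====
def Spec_extract_skills_from_text_py (text : String) (skill_list : List String) (out : List String) : Prop := out = extract_skills_from_text_py_alt text skill_list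
instance (text : String) (skill_list : List String) (out : List String) : Decidable (Spec_extract_skills_from_text_py text skill_list out) := by unfold Spec_extract_skills_from_text_py; infer_instance

-- ===== CLAIM (what is proved, stated in full; the proofs are below) =====
def Claim_equal_extract_skills_from_text_py : Prop := ∀ (text : String) (skill_list : List String), Dom_extract_skills_from_text_py text skill_list → Spec_extract_skills_from_text_py text skill_list (extract_skills_from_text_py text skill_list)

-- ===== LEMMAS AND PROOFS =====

-- substring order facts
theorem isIn_refl (s : String) : PySem.Str.isIn s s = true :=
  (PySem.Str.isIn_iff_infix s s).mpr (List.infix_refl _)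

theorem isIn_trans {a b c : String} (h1 : PySem.Str.isIn a b = true)
    (h2 : PySem.Str.isIn b c = true) : PySem.Str.isIn a c = true :=
  (PySem.Str.isIn_iff_infix a c).mpr
    (((PySem.Str.isIn_iff_infix a b).mp h1).trans ((PySem.Str.isIn_iff_infix b c).mp h2))

theorem isIn_eq_of_len_le {s t : String} (h : PySem.Str.isIn s t = true)
    (hl : t.toList.length ≤ s.toList.length) : s = t := by
  have hinf := (PySem.Str.isIn_iff_infix s t).mp h
  have hsub := hinf.sublist
  have := hsub.eq_of_length (le_antisymm hsub.length_le hl)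
  exact String.toList_inj.mp this

-- the step of A's loop once the redundant `skill not in found` test is removed
def stepK (found : List String) (s : String) : List String :=
  if found.any (fun f => PySem.Str.isIn s f) then found else found ++ [s]

theorem bodyA_eq (tl : String) (acc : List String) (s : String) :
    (if PySem.Str.isIn s tl && !(acc.contains s) then
        (if !(acc.any (fun f => PySem.Str.isIn s f)) then acc ++ [s] else acc)
      else acc)
    = if PySem.Str.isIn s tl then stepK acc s else acc := by
  unfold stepK
  cases ho : PySem.Str.isIn s tl with
  | false => simp only [Bool.false_and, Bool.false_eq_true, if_false]
  | true =>
    cases hc : acc.contains s with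
    | true =>
      have hany : acc.any (fun f => PySem.Str.isIn s f) = true :=
        List.any_eq_true.mpr ⟨s, by simpa using hc, (PySem.Str.isIn_iff_infix s s).mpr (List.infix_refl _)⟩
      simp only [hany, Bool.not_true, Bool.and_false, Bool.false_eq_true, if_false, if_true]
    | false =>
      simp only [Bool.not_false, Bool.and_true, if_true]
      cases hany : acc.any (fun f => PySem.Str.isIn s f) with
      | false => simp
      | true => simp

theorem foldl_guard_filter (p : String → Bool) (l : List String) :
    ∀ acc, l.foldl (fun a s => if p s then stepK a s else a) acc
      = (l.filter p).foldl stepK acc := by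
  induction l with
  | nil => intro acc; rfl
  | cons x xs ih =>
    intro acc
    cases h : p x with
    | true => simp only [List.foldl_cons, List.filter_cons, h, if_true, List.foldl_cons]; exact ih _
    | false => simp only [List.foldl_cons, List.filter_cons, h, Bool.false_eq_true, if_false]; exact ih _

theorem stepK_prefix (acc : List String) (s : String) : acc <+: stepK acc s := by
  unfold stepK; split
  · exact List.prefix_refl _
  · exact ⟨[s], rfl⟩

theorem foldl_stepK_absorb (s : String) (l : List String) :
    ∀ acc, acc.any (fun f => PySem.Str.isIn s f) = true →
      l.foldl stepK acc = (l.filter (fun t => !(t == s))).foldl stepK acc := by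
  induction l with
  | nil => intro acc _; rfl
  | cons t rest ih =>
    intro acc h
    cases hts : (t == s) with
    | true =>
      have ht : t = s := by simpa using hts
      subst ht
      have hstep : stepK acc t = acc := by unfold stepK; rw [h]; simp
      simp only [List.foldl_cons, List.filter_cons, hts, Bool.not_true, Bool.false_eq_true,
        if_false, hstep]
      exact ih acc h
    | false =>
      simp only [List.foldl_cons, List.filter_cons, hts, Bool.not_false, if_true, List.foldl_cons]
      refine ih (stepK acc t) ?_
      obtain ⟨ext, hext⟩ := stepK_prefix acc t
      rw [← hext, List.any_append, h, Bool.true_or]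

-- PySem.List.dedup is foldl PySem.Set.add []: its one-step recursion and sublist property
theorem foldl_add_absorb (x : String) (l : List String) :
    ∀ acc : List String, acc.contains x = true →
      l.foldl PySem.Set.add acc = (l.filter (fun y => !(y == x))).foldl PySem.Set.add acc := by
  induction l with
  | nil => intro acc _; rfl
  | cons y rest ih =>
    intro acc h
    cases hy : (y == x) with
    | true =>
      have hyx : y = x := by simpa using hy
      subst hyx
      have hstep : PySem.Set.add acc y = acc := by
        unfold PySem.Set.add PySem.Set.contains; rw [h]; simp
      simp only [List.foldl_cons, List.filter_cons, hy, Bool.not_true, Bool.false_eq_true,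
        if_false, hstep]
      exact ih acc h
    | false =>
      simp only [List.foldl_cons, List.filter_cons, hy, Bool.not_false, if_true, List.foldl_cons]
      refine ih _ ?_
      unfold PySem.Set.add PySem.Set.contains
      split
      · exact h
      · rw [List.contains_append, h, Bool.true_or]

theorem foldl_add_pre (l : List String) :
    ∀ pre acc : List String, (∀ a ∈ l, a ∉ pre) →
      l.foldl PySem.Set.add (pre ++ acc) = pre ++ l.foldl PySem.Set.add acc := by
  induction l with
  | nil => intro pre acc _; rfl
  | cons a rest ih =>
    intro pre acc hni
    have hnp : a ∉ pre := hni a (List.mem_cons_self)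
    have hcp : pre.contains a = false := by simpa using hnp
    have hstep : PySem.Set.add (pre ++ acc) a = pre ++ PySem.Set.add acc a := by
      unfold PySem.Set.add PySem.Set.contains
      rw [List.contains_append, hcp, Bool.false_or]
      split
      · rfl
      · rw [List.append_assoc]
    simp only [List.foldl_cons, hstep]
    exact ih pre _ (fun b hb => hni b (List.mem_cons_of_mem _ hb))

theorem dedup_cons (s : String) (l : List String) :
    PySem.List.dedup (s :: l) = s :: PySem.List.dedup (l.filter (fun t => !(t == s))) := by
  show List.foldl PySem.Set.add PySem.Set.empty (s :: l) = _
  have h1 : List.foldl PySem.Set.add PySem.Set.empty (s :: l)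
      = List.foldl PySem.Set.add [s] l := by rfl
  rw [h1, foldl_add_absorb s l [s] (by simp)]
  have h2 : ∀ a ∈ l.filter (fun t => !(t == s)), a ∉ [s] := by
    intro a ha
    simp only [List.mem_filter] at ha
    simp only [List.mem_singleton]
    intro he; subst he; simp at ha
  have h3 := foldl_add_pre (l.filter (fun t => !(t == s))) [s] [] h2
  simpa using h3

theorem foldl_add_sublist (l : List String) :
    ∀ acc : List String, (l.foldl PySem.Set.add acc).Sublist (acc ++ l) := by
  induction l with
  | nil => intro acc; simp
  | cons x rest ih =>
    intro acc
    have h1 : (PySem.Set.add acc x).Sublist (acc ++ [x]) := by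
      unfold PySem.Set.add
      split
      · exact List.sublist_append_left acc [x]
      · exact List.Sublist.refl _
    refine (ih (PySem.Set.add acc x)).trans ?_
    have h3 : ((PySem.Set.add acc x) ++ rest).Sublist ((acc ++ [x]) ++ rest) :=
      h1.append_right rest
    simpa [List.append_assoc] using h3

theorem dedup_sublist (l : List String) : (PySem.List.dedup l).Sublist l := by
  simpa using foldl_add_sublist l []

theorem foldl_stepK_dedup (l : List String) :
    ∀ acc, l.foldl stepK acc = (PySem.List.dedup l).foldl stepK acc := by
  match l with
  | [] => intro acc; rfl
  | s :: rest =>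
    intro acc
    rw [dedup_cons]
    simp only [List.foldl_cons]
    have hany : (stepK acc s).any (fun f => PySem.Str.isIn s f) = true := by
      unfold stepK
      cases h : acc.any (fun f => PySem.Str.isIn s f) with
      | true => simpa using h
      | false =>
        simp only [Bool.false_eq_true, if_false, List.any_append, h, Bool.false_or,
          List.any_cons, List.any_nil, Bool.or_false]
        exact isIn_refl s
    rw [foldl_stepK_absorb s rest (stepK acc s) hany]
    exact foldl_stepK_dedup (rest.filter (fun t => !(t == s))) (stepK acc s)
termination_by l.length
decreasing_by simpa using Nat.lt_succ_of_le (List.length_filter_le _ rest)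

-- B's keep-the-maximal-skills predicate, named for the proofs
def keepP (m : List String) (s : String) : Bool :=
  !(m.any (fun t => t != s && PySem.Str.isIn s t))

-- the invariant linking A's greedy accumulation to B's maximality filter on a
-- duplicate-free, length-nonincreasing list
theorem main_inv (m : List String) (hnd : m.Nodup)
    (hpw : m.Pairwise (fun a b => PySem.Str.len b ≤ PySem.Str.len a)) :
    ∀ (todo processed acc : List String), m = processed ++ todo →
      (∀ p ∈ processed, ∃ u ∈ acc, PySem.Str.isIn p u = true) →
      acc = processed.filter (keepP m) →
      todo.foldl stepK acc = m.filter (keepP m) := by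
  intro todo
  induction todo with
  | nil =>
    intro processed acc hm _ hacc
    rw [List.append_nil] at hm
    subst hm
    simpa using hacc
  | cons s rest ih =>
    intro processed acc hm hdom hacc
    have hsnp : s ∉ processed := by
      intro hs
      have hnd' := hm ▸ hnd
      exact (List.disjoint_of_nodup_append hnd') hs List.mem_cons_self
    cases h : acc.any (fun f => PySem.Str.isIn s f) with
    | true =>
      have hstep : stepK acc s = acc := by unfold stepK; rw [h]; simp
      obtain ⟨u, hu, hsu⟩ := List.any_eq_true.mp h
      have hup : u ∈ processed := by
        have : u ∈ processed.filter (keepP m) := hacc ▸ hu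
        exact (List.mem_filter.mp this).1
      have hus : u ≠ s := fun he => hsnp (he ▸ hup)
      have hum : u ∈ m := by rw [hm]; exact List.mem_append_left _ hup
      have hkeep : keepP m s = false := by
        unfold keepP
        simp only [Bool.not_eq_false']
        exact List.any_eq_true.mpr ⟨u, hum, by simp only [Bool.and_eq_true, bne_iff_ne, ne_eq]; exact ⟨hus, hsu⟩⟩
      simp only [List.foldl_cons, hstep]
      refine ih (processed ++ [s]) acc (by rw [hm, List.append_assoc]; rfl) ?_ ?_
      · intro p hp
        rcases List.mem_append.mp hp with hp | hp
        · exact hdom p hp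
        · have : p = s := by simpa using hp
          subst this
          exact ⟨u, hu, hsu⟩
      · rw [List.filter_append, List.filter_cons, hkeep]
        simpa using hacc
    | false =>
      have hstep : stepK acc s = acc ++ [s] := by unfold stepK; rw [h]; simp
      have hkeep : keepP m s = true := by
        unfold keepP
        simp only [Bool.not_eq_true']
        refine List.any_eq_false.mpr ?_
        intro t htm
        simp only [Bool.and_eq_true, bne_iff_ne, ne_eq, not_and]
        intro hts hst
        rcases List.mem_append.mp (hm ▸ htm) with htp | htr
        · obtain ⟨u, hu, htu⟩ := hdom t htp
          have : acc.any (fun f => PySem.Str.isIn s f) = true :=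
            List.any_eq_true.mpr ⟨u, hu, isIn_trans hst htu⟩
          rw [h] at this
          exact Bool.false_ne_true this
        · rcases List.mem_cons.mp htr with he | htr
          · exact hts he
          · have hpw' : (s :: rest).Pairwise (fun a b => PySem.Str.len b ≤ PySem.Str.len a) :=
              (List.pairwise_append.mp (hm ▸ hpw)).2.1
            have hle : PySem.Str.len t ≤ PySem.Str.len s :=
              (List.pairwise_cons.mp hpw').1 t htr
            have hlen : t.toList.length ≤ s.toList.length := by
              rw [PySem.Str.len_eq, PySem.Str.len_eq] at hle
              exact_mod_cast hle
            exact hts (isIn_eq_of_len_le hst hlen).symm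
      simp only [List.foldl_cons, hstep]
      refine ih (processed ++ [s]) (acc ++ [s]) (by rw [hm, List.append_assoc]; rfl) ?_ ?_
      · intro p hp
        rcases List.mem_append.mp hp with hp | hp
        · obtain ⟨u, hu, hpu⟩ := hdom p hp
          exact ⟨u, List.mem_append_left _ hu, hpu⟩
        · have : p = s := by simpa using hp
          subst this
          exact ⟨p, List.mem_append_right _ List.mem_cons_self, isIn_refl p⟩
      · rw [List.filter_append, List.filter_cons, hkeep]
        simp [hacc]

-- ===== VERDICT (by name: the statement is the Claim_ definition above) =====
theorem extract_skills_from_text_py_spec : Claim_equal_extract_skills_from_text_py := by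
  unfold Claim_equal_extract_skills_from_text_py
  intro text skill_list _
  unfold Spec_extract_skills_from_text_py
  unfold extract_skills_from_text_py extract_skills_from_text_py_alt
  by_cases ht : text = ""
  · simp [ht]
  · simp only [if_neg ht]
    have e1 : ∀ (l : List String) (tl : String),
        l.foldl (fun found skill =>
          if PySem.Str.isIn skill tl && !(found.contains skill) then
            if !(found.any (fun f => PySem.Str.isIn skill f)) then found ++ [skill]
            else found
          else found) []
        = l.foldl (fun a s => if PySem.Str.isIn s tl then stepK a s else a) [] := by
      intro l tl
      congr 1
      funext acc s
      exact bodyA_eq tl acc s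
    rw [e1]
    rw [foldl_guard_filter (fun s => PySem.Str.isIn s (PySem.Str.lower text))]
    rw [foldl_stepK_dedup]
    have hnd := PySem.List.nodup_dedup
      ((PySem.List.sorted skill_list (fun s => PySem.Str.len s) true).filter
        (fun s => PySem.Str.isIn s (PySem.Str.lower text)))
    have hpwl := PySem.List.sorted_pairwise_rev skill_list (fun s => PySem.Str.len s)
    have hpwf := hpwl.filter (fun s => PySem.Str.isIn s (PySem.Str.lower text))
    have hpw := hpwf.sublist (dedup_sublist _)
    exact main_inv _ hnd hpw _ [] [] rfl (by simp) rfl
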